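-- pv_equiv track=rewrite | github.com/songzhengliang/Greenhouse-Anomaly-Detection-in-Environmental-Sensor-Data-Using-TinyML | board_ai_runtime.py | _unchanged_run
-- ===== SOURCE A (Python) =====
-- def _unchanged_run(values, tolerance):
--     run = 1
--     last_value = values[-1]
--     for value in reversed(values[:-1]):
--         if abs(value - last_value) <= tolerance:
--             run += 1
--         else:
--             break
--     return run
-- ===== SOURCE B (Python) =====
-- def _unchanged_run(values, tolerance):
--     last_value = values[-1]
--     last_break = 0
--     for i, value in enumerate(values[:-1]):
--         if abs(value - last_value) > tolerance:
--             last_break = i + 1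
--     return len(values) - last_break
-- ===== Notes on version B (the rewrite author's own statement) =====
-- stated objective: alternative
-- what changed: Replaces the backward scan with early break by a single forward pass that records the index just past the most recent tolerance violation and returns len(values) minus it.
import Mathlib
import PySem

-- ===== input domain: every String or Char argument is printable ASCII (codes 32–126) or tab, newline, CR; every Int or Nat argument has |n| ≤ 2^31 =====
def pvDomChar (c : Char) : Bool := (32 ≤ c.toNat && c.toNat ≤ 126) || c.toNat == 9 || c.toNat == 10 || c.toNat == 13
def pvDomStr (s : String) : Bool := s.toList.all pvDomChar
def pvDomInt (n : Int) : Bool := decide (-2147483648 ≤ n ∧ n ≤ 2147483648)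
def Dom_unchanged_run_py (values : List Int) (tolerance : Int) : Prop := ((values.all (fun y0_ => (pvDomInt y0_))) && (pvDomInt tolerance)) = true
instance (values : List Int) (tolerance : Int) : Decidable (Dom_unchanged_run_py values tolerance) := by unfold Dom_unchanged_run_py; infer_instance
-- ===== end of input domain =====

-- B replaces A's backward scan with early break by a forward pass recording the last
-- violation index; same return value on every nonempty list (alternative decomposition).

-- ===== PORT A =====
-- the 'for value in reversed(values[:-1]): if ok: run += 1 else: break' loop
def pvGoA (xs : List Int) (last tol run : Int) : Int :=
  match xs with
  | [] => run
  | v :: rest => if |v - last| ≤ tol then pvGoA rest last tol (run + 1) else run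

def unchanged_run_py (values : List Int) (tolerance : Int) : Int :=
  match PySem.List.pyGet? values (-1) with      -- values[-1]; none = IndexError, excluded by Pre_
  | none => 0
  | some last_value =>
      pvGoA ((PySem.List.slice values none (some (-1))).reverse) last_value tolerance 1

-- ===== PORT B =====
def unchanged_run_py_alt (values : List Int) (tolerance : Int) : Int :=
  match PySem.List.pyGet? values (-1) with      -- values[-1]; none = IndexError, excluded by Pre_
  | none => 0
  | some last_value =>
      let last_break :=
        (PySem.List.enumerate (PySem.List.slice values none (some (-1))) 0).foldl
          (fun lb p => if |p.2 - last_value| > tolerance then p.1 + 1 else lb) 0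
      (values.length : Int) - last_break

-- ===== PRECONDITION & SPEC =====
-- Pre_ excludes only the empty list, on which A (and B) raise IndexError at values[-1].
def Pre_unchanged_run_py (values : List Int) (tolerance : Int) : Prop := values ≠ []
instance (values : List Int) (tolerance : Int) : Decidable (Pre_unchanged_run_py values tolerance) := by unfold Pre_unchanged_run_py; infer_instance
def pvWitness_unchanged_run_py : List Int × Int := ([3, 4], 1)

def Spec_unchanged_run_py (values : List Int) (tolerance : Int) (out : Int) : Prop := out = unchanged_run_py_alt values tolerance
instance (values : List Int) (tolerance : Int) (out : Int) : Decidable (Spec_unchanged_run_py values tolerance out) := by unfold Spec_unchanged_run_py; infer_instance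

-- ===== CLAIM (what is proved, stated in full; the proofs are below) =====
def Claim_equal_unchanged_run_py : Prop := ∀ (values : List Int) (tolerance : Int), Dom_unchanged_run_py values tolerance → Pre_unchanged_run_py values tolerance → Spec_unchanged_run_py values tolerance (unchanged_run_py values tolerance)

-- ===== LEMMAS AND PROOFS =====

-- B's fold over the enumerated prefix, as a function of the prefix
def pvF (ys : List Int) (last tol : Int) : Int :=
  (PySem.List.enumerate ys 0).foldl
    (fun lb p => if |p.2 - last| > tol then p.1 + 1 else lb) 0

theorem pvF_concat (zs : List Int) (v last tol : Int) :
    pvF (zs ++ [v]) last tol =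
      if |v - last| > tol then (zs.length : Int) + 1 else pvF zs last tol := by
  unfold pvF
  rw [PySem.List.enumerate_append, List.foldl_append]
  simp [PySem.List.enumerate]

-- main invariant: A's backward count equals length + 1 minus B's last-break index
theorem pvGoA_eq (last tol : Int) (ys : List Int) :
    pvGoA ys.reverse last tol 1 = (ys.length : Int) + 1 - pvF ys last tol := by
  induction ys using List.reverseRecOn with
  | nil => simp [pvGoA, pvF, PySem.List.enumerate]
  | append_singleton zs v ih =>
      rw [pvF_concat]
      by_cases h : |v - last| ≤ tol
      · have hgt : ¬ (|v - last| > tol) := not_lt.mpr h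
        have hshift : ∀ (xs : List Int) (r : Int),
            pvGoA xs last tol (r + 1) = pvGoA xs last tol r + 1 := by
          intro xs
          induction xs with
          | nil => intro r; simp [pvGoA]
          | cons a as iha =>
              intro r
              simp only [pvGoA]
              split_ifs with h' <;> simp [iha]
        simp only [List.reverse_append, List.reverse_singleton, List.singleton_append,
          pvGoA, if_pos h, if_neg hgt, List.length_append, List.length_singleton]
        rw [show (1 : Int) + 1 = 1 + 1 from rfl, hshift, ih]
        push_cast; ring
      · have hgt : |v - last| > tol := lt_of_not_ge h
        simp only [List.reverse_append, List.reverse_singleton, List.singleton_append,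
          pvGoA, if_neg h, if_pos hgt, List.length_append, List.length_singleton]
        push_cast; ring

-- ===== VERDICT (by name: the statement is the Claim_ definition above) =====
theorem unchanged_run_py_spec : Claim_equal_unchanged_run_py := by
  intro values tolerance _ hpre
  unfold Spec_unchanged_run_py unchanged_run_py unchanged_run_py_alt
  have hlast : PySem.List.pyGet? values (-1) = values.getLast? := PySem.List.pyGet?_neg_one values
  rcases hv : PySem.List.pyGet? values (-1) with _ | last
  · rw [hlast] at hv
  · simp only
    rw [PySem.List.slice_to_neg_one]
    rw [pvGoA_eq]
    have hlen : values.dropLast.length = values.length - 1 := List.length_dropLast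
    have hpos : 0 < values.length := List.length_pos_iff.mpr hpre
    show (values.dropLast.length : Int) + 1 - pvF values.dropLast last tolerance
        = (values.length : Int) - pvF values.dropLast last tolerance
    rw [hlen]
    omega
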